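-- pv_equiv track=rewrite | github.com/trmznt/fatools | fatools/lib/fautil/algo.py | get_consensus_indices
-- ===== SOURCE A (Python) =====
-- def get_consensus_indices( indices_set ):
--
--     n = len(indices_set)
--     indices = {}
--     for indices_item in indices_set:
--         for i in indices_item:
--             try:
--                 indices[i] += 1
--             except KeyError:
--                 indices[i] = 1
--     threshold = n/2
--     real_indices = []
--     for (k,v) in indices.items():
--         if v > threshold:
--             real_indices.append( k )
--
--     return sorted( real_indices )
-- ===== SOURCE B (Python) =====
-- def get_consensus_indices(indices_set):
--     n = len(indices_set)
--     flat = sorted(x for xs in indices_set for x in xs)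
--     result = []
--     prev = None
--     run = 0
--     for x in flat:
--         if run > 0 and x == prev:
--             run += 1
--         else:
--             if 2 * run > n:
--                 result.append(prev)
--             prev = x
--             run = 1
--     if 2 * run > n:
--         result.append(prev)
--     return result
-- ===== Notes on version B (the rewrite author's own statement) =====
-- stated objective: alternative
-- what changed: Replaces A's dict-based counting pass plus final sort of qualifying keys by flattening all indices into one list, sorting it once, and scanning it while tracking run lengths, emitting a value when its run exceeds n/2 (output is already in ascending order).
import Mathlib
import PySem

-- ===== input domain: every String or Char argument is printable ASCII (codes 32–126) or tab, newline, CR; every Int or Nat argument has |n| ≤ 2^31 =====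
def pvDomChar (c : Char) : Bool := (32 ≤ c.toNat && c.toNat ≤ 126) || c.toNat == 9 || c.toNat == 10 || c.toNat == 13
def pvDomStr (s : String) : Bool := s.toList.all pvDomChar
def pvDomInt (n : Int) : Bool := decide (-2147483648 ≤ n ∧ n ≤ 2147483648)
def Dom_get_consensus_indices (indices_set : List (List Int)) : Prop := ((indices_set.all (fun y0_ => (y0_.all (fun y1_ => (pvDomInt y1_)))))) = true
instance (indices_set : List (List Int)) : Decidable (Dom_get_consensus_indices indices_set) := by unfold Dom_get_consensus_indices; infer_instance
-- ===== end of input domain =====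

-- B replaces A's dict-counting pass and final sort by a flatten-sort-and-scan-runs pass
-- (objective: alternative decomposition, same O(m log m) cost); return value only, no mutation.

-- ===== PORT A =====
-- try: indices[i] += 1 / except KeyError: indices[i] = 1  is  d.modify i 0 (· + 1);
-- 'v > n/2' on ints is ported exactly as 2*v > n (float n/2, strict >).
def get_consensus_indices (indices_set : List (List Int)) : List Int :=
  let n : Int := indices_set.length
  let indices : PySem.Dict Int Int :=
    indices_set.foldl (fun d indices_item =>
      indices_item.foldl (fun d i => d.modify i 0 (· + 1)) d) PySem.Dict.empty
  let real_indices : List Int :=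
    indices.items.foldl (fun acc kv => if 2 * kv.2 > n then acc ++ [kv.1] else acc) []
  PySem.List.sorted real_indices (fun x => x) false

-- ===== PORT B =====
-- B's for-loop over the tail of the sorted flat list, state (result, prev, run),
-- as structural recursion; the trailing 'if 2*run > n: result.append(prev)' is the [] case.
def altLoop (n : Int) : List Int → Int → Int → List Int → List Int
  | [], prev, run, result => if 2 * run > n then result ++ [prev] else result
  | x :: rest, prev, run, result =>
      if x = prev then altLoop n rest prev (run + 1) result
      else altLoop n rest x 1 (if 2 * run > n then result ++ [prev] else result)

def get_consensus_indices_alt (indices_set : List (List Int)) : List Int :=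
  let n : Int := indices_set.length
  let flat := PySem.List.sorted (indices_set.flatMap (fun xs => xs)) (fun x => x) false
  match flat with
  | [] => []
  | x :: rest => altLoop n rest x 1 []

-- ===== PRECONDITION & SPEC =====
def Spec_get_consensus_indices (indices_set : List (List Int)) (out : List Int) : Prop := out = get_consensus_indices_alt indices_set
instance (indices_set : List (List Int)) (out : List Int) : Decidable (Spec_get_consensus_indices indices_set out) := by unfold Spec_get_consensus_indices; infer_instance

-- ===== CLAIM (what is proved, stated in full; the proofs are below) =====
def Claim_equal_get_consensus_indices : Prop := ∀ (indices_set : List (List Int)), Dom_get_consensus_indices indices_set → Spec_get_consensus_indices indices_set (get_consensus_indices indices_set)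

-- ===== LEMMAS AND PROOFS =====

-- Membership in altLoop's result, on a sorted (x :: rest).
lemma mem_altLoop (n : Int) (rest : List Int) (x run : Int) (result : List Int)
    (hs : (x :: rest).Pairwise (· ≤ ·)) (k : Int) :
    k ∈ altLoop n rest x run result ↔
      k ∈ result ∨ (k = x ∧ 2 * (run + (rest.count x : Int)) > n) ∨
        (k ∈ rest ∧ k ≠ x ∧ 2 * ((rest.count k : Int)) > n) := by
  induction rest generalizing x run result with
  | nil =>
    simp only [altLoop, List.count_nil]
    split_ifs with h
    · simp only [List.mem_append, List.mem_singleton, List.not_mem_nil, false_and,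
        or_false]
      constructor
      · rintro (hk | hk)
        · exact Or.inl hk
        · exact Or.inr ⟨hk, by simpa using h⟩
      · rintro (hk | ⟨hk, _⟩)
        · exact Or.inl hk
        · exact Or.inr hk
    · simp only [List.not_mem_nil, false_and, or_false, Nat.cast_zero, add_zero]
      constructor
      · exact Or.inl
      · rintro (hk | ⟨hk, hc⟩)
        · exact hk
        · exact absurd hc (by simpa using h)
  | cons y t ih =>
    rcases List.pairwise_cons.mp hs with ⟨hxle, hst⟩
    by_cases hyx : y = x
    · subst hyx
      simp only [altLoop, if_true]
      rw [ih y (run + 1) result hst]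
      constructor
      · rintro (hk | ⟨rfl, hc⟩ | ⟨hk, hne, hc⟩)
        · exact Or.inl hk
        · refine Or.inr (Or.inl ⟨rfl, ?_⟩)
          rw [List.count_cons_self]
          push_cast at hc ⊢
          omega
        · exact Or.inr (Or.inr ⟨List.mem_cons_of_mem _ hk, hne,
            by rwa [List.count_cons_of_ne (Ne.symm hne)] ⟩)
      · rintro (hk | ⟨rfl, hc⟩ | ⟨hk, hne, hc⟩)
        · exact Or.inl hk
        · refine Or.inr (Or.inl ⟨rfl, ?_⟩)
          rw [List.count_cons_self] at hc
          push_cast at hc ⊢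
          omega
        · rcases List.mem_cons.mp hk with hk' | hk'
          · exact absurd hk' hne
          · exact Or.inr (Or.inr ⟨hk', hne, by rwa [List.count_cons_of_ne (Ne.symm hne)] at hc⟩)
    · -- y ≠ x, and since the list is sorted, x does not occur in y :: t at all
      have hxy : x ≤ y := hxle y (List.mem_cons_self)
      have hxnot : x ∉ y :: t := by
        intro hmem
        rcases List.mem_cons.mp hmem with h' | h'
        · exact hyx h'.symm
        · have : y ≤ x := (List.pairwise_cons.mp hst).1 x h'
          exact hyx (le_antisymm this hxy)
      have hcx : (y :: t).count x = 0 := List.count_eq_zero.mpr hxnot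
      simp only [altLoop, if_neg hyx]
      rw [ih y 1 _ hst]
      have hres : k ∈ (if 2 * run > n then result ++ [x] else result) ↔
          k ∈ result ∨ (k = x ∧ 2 * run > n) := by
        split_ifs with h
        · simp only [List.mem_append, List.mem_singleton]
          constructor
          · rintro (hk | hk)
            · exact Or.inl hk
            · exact Or.inr ⟨hk, h⟩
          · rintro (hk | ⟨hk, _⟩)
            · exact Or.inl hk
            · exact Or.inr hk
        · exact ⟨Or.inl, fun hk => hk.elim id (fun ⟨_, hc⟩ => absurd hc h)⟩
      rw [hres]
      constructor
      · rintro ((hk | ⟨hk, hc⟩) | ⟨hk, hc⟩ | ⟨hk, hne, hc⟩)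
        · exact Or.inl hk
        · refine Or.inr (Or.inl ⟨hk, ?_⟩)
          rw [hcx]
          push_cast
          omega
        · subst hk
          refine Or.inr (Or.inr ⟨List.mem_cons_self, hyx, ?_⟩)
          simp only [List.count_cons_self]
          push_cast
          omega
        · exact Or.inr (Or.inr ⟨List.mem_cons_of_mem _ hk, fun h => hxnot (by rw [← h]; exact List.mem_cons_of_mem _ hk), by
            rwa [List.count_cons_of_ne (Ne.symm hne)]⟩)
      · rintro (hk | ⟨hk, hc⟩ | ⟨hk, hne, hc⟩)
        · exact Or.inl (Or.inl hk)
        · subst hk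
          rw [hcx] at hc
          push_cast at hc
          exact Or.inl (Or.inr ⟨rfl, by omega⟩)
        · rcases List.mem_cons.mp hk with hk' | hk'
          · subst hk'
            simp only [List.count_cons_self] at hc
            push_cast at hc
            exact Or.inr (Or.inl ⟨rfl, by omega⟩)
          · by_cases hky : k = y
            · subst hky
              simp only [List.count_cons_self] at hc
              push_cast at hc
              exact Or.inr (Or.inl ⟨rfl, by omega⟩)
            · exact Or.inr (Or.inr ⟨hk', hky, by rwa [List.count_cons_of_ne (Ne.symm hky)] at hc⟩)

-- altLoop's result is strictly increasing.
lemma pairwise_altLoop (n : Int) (rest : List Int) (x run : Int) (result : List Int)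
    (hs : (x :: rest).Pairwise (· ≤ ·)) (hres : result.Pairwise (· < ·))
    (hlt : ∀ a ∈ result, a < x) :
    (altLoop n rest x run result).Pairwise (· < ·) := by
  induction rest generalizing x run result with
  | nil =>
    simp only [altLoop]
    split_ifs with h
    · exact List.pairwise_append.mpr ⟨hres, List.pairwise_singleton _ _,
        fun a ha b hb => by simpa [List.mem_singleton.mp hb] using hlt a ha⟩
    · exact hres
  | cons y t ih =>
    rcases List.pairwise_cons.mp hs with ⟨hxle, hst⟩
    by_cases hyx : y = x
    · subst hyx
      simp only [altLoop]
      exact ih y (run + 1) result hst hres hlt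
    · have hxy : x < y := lt_of_le_of_ne (hxle y List.mem_cons_self) (fun h => hyx h.symm)
      simp only [altLoop, if_neg hyx]
      refine ih y 1 _ hst ?_ ?_
      · split_ifs with h
        · exact List.pairwise_append.mpr ⟨hres, List.pairwise_singleton _ _,
            fun a ha b hb => by simpa [List.mem_singleton.mp hb] using hlt a ha⟩
        · exact hres
      · intro a ha
        split_ifs at ha with h
        · rcases List.mem_append.mp ha with ha' | ha'
          · exact lt_trans (hlt a ha') hxy
          · rw [List.mem_singleton.mp ha']; exact hxy
        · exact lt_trans (hlt a ha) hxy

-- A's real_indices list: the distinct flattened values with count above the threshold.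
lemma realIndices_eq (indices_set : List (List Int)) :
    (let n : Int := indices_set.length
     let indices : PySem.Dict Int Int :=
       indices_set.foldl (fun d indices_item =>
         indices_item.foldl (fun d i => d.modify i 0 (· + 1)) d) PySem.Dict.empty
     indices.items.foldl (fun acc kv => if 2 * kv.2 > n then acc ++ [kv.1] else acc) []) =
    (PySem.Set.ofList indices_set.flatten).filter
      (fun k => decide (2 * (indices_set.flatten.count k : Int) > (indices_set.length : Int))) := by
  have hdict : indices_set.foldl (fun d indices_item =>
      indices_item.foldl (fun d i => d.modify i 0 (· + 1)) d) PySem.Dict.empty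
      = PySem.Dict.counter indices_set.flatten := by
    rw [PySem.Dict.counter_eq_foldl, List.foldl_flatten]
  simp only [hdict, PySem.Dict.items_counter]
  rw [PySem.List.foldl_append_ite
    (p := fun kv : Int × Int => 2 * kv.2 > (indices_set.length : Int))
    (f := fun kv : Int × Int => kv.1), List.nil_append, List.filter_map, List.map_map]
  simp [Function.comp_def]

-- ===== VERDICT (by name: the statement is the Claim_ definition above) =====
theorem get_consensus_indices_spec : Claim_equal_get_consensus_indices := by
  intro indices_set _
  unfold Spec_get_consensus_indices get_consensus_indices get_consensus_indices_alt
  simp only [List.flatMap_id']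
  have hreal := realIndices_eq indices_set
  simp only at hreal
  rw [hreal]
  generalize hf : PySem.List.sorted (indices_set.flatten) (fun x => x) false = flat
  have hperm : flat.Perm indices_set.flatten := hf ▸ PySem.List.sorted_perm _ _ _
  have hsorted : flat.Pairwise (· ≤ ·) := by
    rw [← hf]
    simpa using PySem.List.sorted_pairwise indices_set.flatten (fun x => x)
  have hrealnodup : (List.filter (fun k => decide (2 * ((indices_set.flatten.count k : Int)) > (indices_set.length : Int))) (PySem.Set.ofList indices_set.flatten)).Nodup :=
    (PySem.Set.nodup_ofList indices_set.flatten).filter _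
  cases flat with
  | nil =>
    have hnil : indices_set.flatten = [] := (List.Perm.symm hperm).eq_nil
    rw [hnil]
    rfl
  | cons x rest =>
    have hmem := mem_altLoop (indices_set.length : Int) rest x 1 [] hsorted
    have hpw : (altLoop (indices_set.length : Int) rest x 1 []).Pairwise (· < ·) :=
      pairwise_altLoop _ rest x 1 [] hsorted List.Pairwise.nil (by simp)
    have hnodup : (altLoop (indices_set.length : Int) rest x 1 []).Nodup :=
      hpw.imp (fun hab => ne_of_lt hab)
    have hmem' : ∀ k, k ∈ altLoop (indices_set.length : Int) rest x 1 [] ↔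
        k ∈ List.filter (fun k => decide (2 * ((indices_set.flatten.count k : Int)) > (indices_set.length : Int))) (PySem.Set.ofList indices_set.flatten) := by
      intro k
      rw [hmem k, List.mem_filter, PySem.Set.mem_ofList, ← hperm.mem_iff, ← hperm.count_eq]
      simp only [List.not_mem_nil, false_or, List.mem_cons, decide_eq_true_eq]
      constructor
      · rintro (⟨rfl, hc⟩ | ⟨hk, hne, hc⟩)
        · refine ⟨Or.inl rfl, ?_⟩
          rw [List.count_cons_self]
          push_cast at hc ⊢
          omega
        · exact ⟨Or.inr hk, by rwa [List.count_cons_of_ne (Ne.symm hne)]⟩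
      · rintro ⟨hk, hc⟩
        by_cases hkx : k = x
        · subst hkx
          refine Or.inl ⟨rfl, ?_⟩
          rw [List.count_cons_self] at hc
          push_cast at hc ⊢
          omega
        · rcases hk with hk' | hk'
          · exact absurd hk' hkx
          · exact Or.inr ⟨hk', hkx, by rwa [List.count_cons_of_ne (Ne.symm hkx)] at hc⟩
    have hpermout := (List.perm_ext_iff_of_nodup hnodup hrealnodup).mpr hmem'
    exact PySem.List.sorted_eq_of_perm_of_pairwise_lt _ _ (fun x => x) hpermout hpw
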